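-- pv_equiv track=rewrite | github.com/mugumedavid/bani | src/bani/infra/os_scheduler.py | _filter_out_project
-- ===== SOURCE A (Python) =====
-- _BANI_TAG_PREFIX = "# bani:"
--
-- def _filter_out_project(crontab_content: str, project_name: str) -> list[str]:
--     """Remove all lines belonging to a given project from crontab content.
--
--     Recognizes the two-line pattern: ``# bani:<project_name>`` followed
--     by the cron entry line.
--
--     Args:
--         crontab_content: Current crontab content.
--         project_name: Project name to remove.
--
--     Returns:
--         List of remaining lines.
--     """
--     tag = f"{_BANI_TAG_PREFIX}{project_name}"
--     lines = crontab_content.splitlines()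
--     result: list[str] = []
--     skip_next = False
--
--     for line in lines:
--         if skip_next:
--             skip_next = False
--             continue
--         if line.strip() == tag:
--             skip_next = True
--             continue
--         result.append(line)
--
--     return result
-- ===== SOURCE B (Python) =====
-- _BANI_TAG_PREFIX = "# bani:"
--
-- def _filter_out_project(crontab_content: str, project_name: str) -> list[str]:
--     """Repeatedly locate the next tag line and splice out the two-line block."""
--     tag = f"{_BANI_TAG_PREFIX}{project_name}"
--     lines = crontab_content.splitlines()
--     result: list[str] = []
--     while True:
--         j = next((k for k, l in enumerate(lines) if l.strip() == tag), None)
--         if j is None: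
--             result.extend(lines)
--             return result
--         result.extend(lines[:j])
--         lines = lines[j + 2:]
-- ===== Notes on version B (the rewrite author's own statement) =====
-- stated objective: alternative
-- what changed: Replaced A's single streaming pass with a skip_next state flag by a splice loop that repeatedly searches for the next tag line and removes the two-line block with slices (extend lines[:j]; lines = lines[j+2:]).
import Mathlib
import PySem

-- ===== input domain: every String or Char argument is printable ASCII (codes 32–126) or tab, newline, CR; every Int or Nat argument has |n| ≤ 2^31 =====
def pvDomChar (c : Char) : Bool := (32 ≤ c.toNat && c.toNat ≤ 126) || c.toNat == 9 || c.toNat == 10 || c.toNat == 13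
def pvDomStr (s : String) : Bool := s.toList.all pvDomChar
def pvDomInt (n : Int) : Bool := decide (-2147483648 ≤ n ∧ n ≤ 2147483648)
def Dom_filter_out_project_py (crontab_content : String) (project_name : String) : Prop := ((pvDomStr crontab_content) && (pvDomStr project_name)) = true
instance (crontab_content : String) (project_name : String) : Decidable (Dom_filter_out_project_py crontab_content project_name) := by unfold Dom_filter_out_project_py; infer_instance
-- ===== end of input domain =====

-- B replaces A's one-pass skip_next state machine by a splice loop: repeatedly find the next tag line and cut out the two-line block with slices (alternative decomposition, same O(n)).


-- ===== PORT A =====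
-- A: fold over the lines carrying (result, skip_next)
def fopAStep (tag : String) (st : List String × Bool) (line : String) : List String × Bool :=
  if st.2 then (st.1, false)
  else if PySem.Str.strip line == tag then (st.1, true)
  else (st.1 ++ [line], false)

def filter_out_project_py (crontab_content : String) (project_name : String) : List String :=
  let tag := "# bani:" ++ project_name
  let lines := PySem.Str.splitlines crontab_content
  (lines.foldl (fopAStep tag) ([], false)).1

-- ===== PORT B =====
-- B: while True: j = first index with lines[j].strip() == tag; if none, extend result
-- with lines and return; else extend result with lines[:j] and set lines = lines[j+2:].
-- next(...) over enumerate = List.findIdx?; lines[:j] / lines[j+2:] with j ≥ 0 = take / drop.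
def fopBLoop (tag : String) (result : List String) (lines : List String) : List String :=
  match h : lines.findIdx? (fun l => PySem.Str.strip l == tag) with
  | none => result ++ lines
  | some j => fopBLoop tag (result ++ lines.take j) (lines.drop (j + 2))
termination_by lines.length
decreasing_by
  have hj : j < lines.length := (List.findIdx?_eq_some_iff_findIdx_eq.mp h).1
  simp only [List.length_drop]
  omega

def filter_out_project_py_alt (crontab_content : String) (project_name : String) : List String :=
  fopBLoop ("# bani:" ++ project_name) [] (PySem.Str.splitlines crontab_content)

-- ===== PRECONDITION & SPEC =====
def Spec_filter_out_project_py (crontab_content : String) (project_name : String) (out : List String) : Prop := out = filter_out_project_py_alt crontab_content project_name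
instance (crontab_content : String) (project_name : String) (out : List String) : Decidable (Spec_filter_out_project_py crontab_content project_name out) := by unfold Spec_filter_out_project_py; infer_instance

-- ===== CLAIM (what is proved, stated in full; the proofs are below) =====
def Claim_equal_filter_out_project_py : Prop := ∀ (crontab_content : String) (project_name : String), Dom_filter_out_project_py crontab_content project_name → Spec_filter_out_project_py crontab_content project_name (filter_out_project_py crontab_content project_name)

-- ===== LEMMAS AND PROOFS =====

-- Proof-side reference function: the straightforward structural recursion both ports simulate.
def fopRef (tag : String) (lines : List String) : List String :=
  match lines with
  | [] => []
  | l :: rest =>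
    if PySem.Str.strip l == tag then fopRef tag (rest.drop 1)
    else l :: fopRef tag rest
termination_by lines.length
decreasing_by
  all_goals simp

-- A's fold equals the reference.
theorem fopA_eq_ref (tag : String) (lines : List String) :
    ∀ acc : List String,
      (lines.foldl (fopAStep tag) (acc, false)).1 = acc ++ fopRef tag lines := by
  fun_induction fopRef tag lines with
  | case1 => simp
  | case2 l rest htag ih =>
    intro acc
    cases rest with
    | nil => simp [fopAStep, htag, fopRef]
    | cons r rs =>
      simp only [List.foldl_cons, fopAStep, htag, if_true]
      simpa using ih acc
  | case3 l rest htag ih =>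
    intro acc
    simp only [List.foldl_cons, fopAStep, htag, Bool.false_eq_true, if_false]
    simpa using ih (acc ++ [l])

-- When a first tag index exists, the reference splits there.
theorem fopRef_of_some (tag : String) (lines : List String) :
    ∀ j : Nat, lines.findIdx? (fun l => PySem.Str.strip l == tag) = some j →
      fopRef tag lines = lines.take j ++ fopRef tag (lines.drop (j + 2)) := by
  induction lines with
  | nil => intro j h; simp at h
  | cons l rest ih =>
    intro j h
    rw [List.findIdx?_cons] at h
    by_cases hp : (PySem.Str.strip l == tag) = true
    · rw [if_pos hp] at h
      obtain rfl : (0 : Nat) = j := by simpa using h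
      simp [fopRef, hp, List.drop_succ_cons]
    · rw [if_neg hp] at h
      obtain ⟨i, hi, rfl⟩ := Option.map_eq_some_iff.mp h
      have h3 : i + 1 + 2 = i + 2 + 1 := by omega
      simp only [fopRef, hp, Bool.false_eq_true, if_false, ih i hi, h3,
        List.take_succ_cons, List.drop_succ_cons]
      simp

-- When no tag index exists, the reference is the identity.
theorem fopRef_of_none (tag : String) (lines : List String)
    (h : lines.findIdx? (fun l => PySem.Str.strip l == tag) = none) :
    fopRef tag lines = lines := by
  induction lines with
  | nil => simp [fopRef]
  | cons l rest ih =>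
    rw [List.findIdx?_cons] at h
    by_cases hp : (PySem.Str.strip l == tag) = true
    · rw [if_pos hp] at h; exact absurd h (by simp)
    · rw [if_neg hp] at h
      simp [fopRef, hp, ih (Option.map_eq_none_iff.mp h)]

-- B's splice loop equals the reference.
theorem fopB_eq_ref (tag : String) (acc : List String) (lines : List String) :
    fopBLoop tag acc lines = acc ++ fopRef tag lines := by
  fun_induction fopBLoop tag acc lines with
  | case1 acc lines h => simp [fopRef_of_none tag lines h]
  | case2 acc lines j h ih =>
    rw [fopRef_of_some tag lines j h, ih]
    simp

-- ===== VERDICT (by name: the statement is the Claim_ definition above) =====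
theorem filter_out_project_py_spec : Claim_equal_filter_out_project_py := by
  intro c p _
  show _ = _
  rw [filter_out_project_py, filter_out_project_py_alt,
    fopA_eq_ref ("# bani:" ++ p) (PySem.Str.splitlines c) [],
    fopB_eq_ref ("# bani:" ++ p) [] (PySem.Str.splitlines c)]
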